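-- pv_equiv track=rewrite | github.com/minsoehtut306/AI-and-Machine-Learning | AI/assignment4.py | build_n_gram
-- ===== SOURCE A (Python) =====
-- def build_n_gram(sequence, n):
--     # Task 1.3
--     # Return an n-gram model.
--     # Replace the line below with your code.
--
--     # Initialize an empty dictionary for the n-gram model
--     n_gram_model = {}
--
--     # Loop through the sequence allowing for the last n-1 tokens to form a complete context
--     for i in range(len(sequence) - n + 1):
--         # Create the context tuple of n-1 tokens
--         context = tuple(sequence[i:i+n-1])
--         # Identify the token that follows the context
--         following_token = sequence[i+n-1]
--
--         # Initialize the dictionary for the context if it does not exist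
--         if context not in n_gram_model:
--             n_gram_model[context] = {}
--
--         # Update the frequency of the following token
--         if following_token in n_gram_model[context]:
--             n_gram_model[context][following_token] += 1  # Increment if exists
--         else:
--             n_gram_model[context][following_token] = 1  # Initialize if new
--
--     return n_gram_model
-- ===== SOURCE B (Python) =====
-- def build_n_gram(sequence, n):
--     # Two staged passes over a flat list of whole n-grams: first count each
--     # distinct n-gram once in a flat table, then assemble the nested model in
--     # first-occurrence order by writing the final totals (no increments).
--     # For n < 1 (or n > len(sequence)) there is no complete n-gram: empty model.
--     if n < 1 or n > len(sequence):
--         return {}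
--     grams = [tuple(sequence[i:i + n]) for i in range(len(sequence) - n + 1)]
--     totals = {}
--     for g in grams:
--         totals[g] = totals.get(g, 0) + 1
--     model = {}
--     for g in grams:
--         model.setdefault(g[:-1], {})[g[-1]] = totals[g]
--     return model
-- ===== Notes on version B (the rewrite author's own statement) =====
-- stated objective: alternative
-- what changed: B replaces A's single incremental pass (nested dicts updated by +1 per window) with two staged passes over a materialized flat list of whole n-gram tuples: pass 1 counts each whole gram in one flat table, pass 2 assembles the nested model in first-occurrence order by writing the precomputed final totals; same O(n*len) cost.
-- intended difference: On inputs with -len(sequence) < n <= 0, A returns a model built from negative-index wraparound slices (e.g. context sequence[0:-1]); B returns the empty model, the intended value since no n-gram exists for n <= 0. — e.g. on build_n_gram(["a"], 0): A returns [([], [("a", 2)])], B returns []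
import Mathlib
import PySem

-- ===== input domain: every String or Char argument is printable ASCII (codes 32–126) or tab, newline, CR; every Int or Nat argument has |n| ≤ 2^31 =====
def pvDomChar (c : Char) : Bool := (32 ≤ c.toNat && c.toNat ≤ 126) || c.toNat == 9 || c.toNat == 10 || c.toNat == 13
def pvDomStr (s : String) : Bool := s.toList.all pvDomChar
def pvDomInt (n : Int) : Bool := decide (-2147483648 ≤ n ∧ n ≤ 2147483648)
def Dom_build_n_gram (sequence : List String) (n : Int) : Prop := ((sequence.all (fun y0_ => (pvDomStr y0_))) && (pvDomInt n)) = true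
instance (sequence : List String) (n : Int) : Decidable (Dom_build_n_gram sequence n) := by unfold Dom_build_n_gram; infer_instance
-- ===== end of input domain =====

-- B counts each whole n-gram once in a flat table and then assembles the nested model from
-- those totals in a second pass, instead of A's single incremental pass over nested dicts;
-- return value only is compared (neither mutates).

-- ===== PORT A =====
-- loop body of A; the state becomes `none` once sequence[i+n-1] would raise IndexError
-- (Pre_build_n_gram excludes exactly those inputs)
def buildStepA (sequence : List String) (n : Int)
    (st : Option (PySem.Dict (List String) (PySem.Dict String Int))) (i : Int) :
    Option (PySem.Dict (List String) (PySem.Dict String Int)) :=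
  match st with
  | none => none
  | some d =>
    let context := PySem.List.slice sequence (some i) (some (i + n - 1))
    match PySem.List.pyGet? sequence (i + n - 1) with
    | none => none
    | some following_token =>
      let d1 := if d.contains context then d else d.insert context PySem.Dict.empty
      let inner := d1.getD context PySem.Dict.empty
      let inner' := if inner.contains following_token
                    then inner.insert following_token (inner.getD following_token 0 + 1)
                    else inner.insert following_token 1
      some (d1.insert context inner')

def build_n_gram (sequence : List String) (n : Int) : List (List String × List (String × Int)) :=
  match (PySem.List.pyRange 0 ((sequence.length : Int) - n + 1) 1).foldl
          (buildStepA sequence n) (some PySem.Dict.empty) with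
  | some d => d.items.map (fun p => (p.1, p.2.items))
  | none => []   -- unreachable inside Pre_build_n_gram (Python A raises IndexError there)

-- ===== PORT B =====
-- pass-2 body of B: model.setdefault(g[:-1], {})[g[-1]] = totals[g]
def buildStepB (totals : PySem.Dict (List String) Int)
    (m : PySem.Dict (List String) (PySem.Dict String Int)) (g : List String) :
    PySem.Dict (List String) (PySem.Dict String Int) :=
  let context := PySem.List.slice g none (some (-1))
  match PySem.List.pyGet? g (-1) with
  | none => m   -- unreachable: every gram has length n ≥ 1 here
  | some tok =>
    let m1 := m.setdefault context PySem.Dict.empty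
    -- totals[g]: g is always a key of totals (it was counted in pass 1), so getD is exact
    m1.insert context ((m1.getD context PySem.Dict.empty).insert tok (totals.getD g 0))

def build_n_gram_alt (sequence : List String) (n : Int) : List (List String × List (String × Int)) :=
  if n < 1 ∨ (sequence.length : Int) < n then []
  else
    let grams := (PySem.List.pyRange 0 ((sequence.length : Int) - n + 1) 1).map
        (fun i => PySem.List.slice sequence (some i) (some (i + n)))
    let totals := grams.foldl
        (fun (t : PySem.Dict (List String) Int) g => t.insert g (t.getD g 0 + 1))
        PySem.Dict.empty
    let model := grams.foldl (buildStepB totals) PySem.Dict.empty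
    model.items.map (fun p => (p.1, p.2.items))

-- ===== PRECONDITION & SPEC =====
-- Pre_ excludes exactly the inputs where A raises IndexError: n ≤ -len(sequence)
def Pre_build_n_gram (sequence : List String) (n : Int) : Prop :=
  -(sequence.length : Int) < n
instance (sequence : List String) (n : Int) : Decidable (Pre_build_n_gram sequence n) := by
  unfold Pre_build_n_gram; infer_instance

def pvWitness_build_n_gram : List String × Int := (["a", "b"], 2)

-- On inputs with -len(sequence) < n ≤ 0, A returns a model built from negative-index
-- wraparound slices (e.g. a context sequence[0:-1]); B returns the empty model, the intended
-- value since no n-gram exists for n ≤ 0.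
def D_build_n_gram (sequence : List String) (n : Int) : Prop := n ≤ 0
instance (sequence : List String) (n : Int) : Decidable (D_build_n_gram sequence n) := by
  unfold D_build_n_gram; infer_instance

def Spec_build_n_gram (sequence : List String) (n : Int) (out : List (List String × List (String × Int))) : Prop :=
  ¬ D_build_n_gram sequence n → out = build_n_gram_alt sequence n
instance (sequence : List String) (n : Int) (out : List (List String × List (String × Int))) : Decidable (Spec_build_n_gram sequence n out) := by
  unfold Spec_build_n_gram; infer_instance

def pvDiffWitness_build_n_gram : List String × Int := (["a"], 0)
def pvDiffWitnessOut_build_n_gram : (List (List String × List (String × Int))) × (List (List String × List (String × Int))) :=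
  ([([], [("a", 2)])], [])

-- ===== CLAIM (what is proved, stated in full; the proofs are below) =====
def Claim_unchanged_build_n_gram : Prop := ∀ (sequence : List String) (n : Int), Dom_build_n_gram sequence n → Pre_build_n_gram sequence n → Spec_build_n_gram sequence n (build_n_gram sequence n)
def Claim_changed_build_n_gram : Prop := Dom_build_n_gram (pvDiffWitness_build_n_gram.1) (pvDiffWitness_build_n_gram.2) ∧ Pre_build_n_gram (pvDiffWitness_build_n_gram.1) (pvDiffWitness_build_n_gram.2) ∧ D_build_n_gram (pvDiffWitness_build_n_gram.1) (pvDiffWitness_build_n_gram.2) ∧ build_n_gram (pvDiffWitness_build_n_gram.1) (pvDiffWitness_build_n_gram.2) = pvDiffWitnessOut_build_n_gram.1 ∧ build_n_gram_alt (pvDiffWitness_build_n_gram.1) (pvDiffWitness_build_n_gram.2) = pvDiffWitnessOut_build_n_gram.2 ∧ pvDiffWitnessOut_build_n_gram.1 ≠ pvDiffWitnessOut_build_n_gram.2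
def Claim_exact_build_n_gram : Prop := ∀ (sequence : List String) (n : Int), Dom_build_n_gram sequence n → Pre_build_n_gram sequence n → D_build_n_gram sequence n → build_n_gram sequence n ≠ build_n_gram_alt sequence n

-- ===== LEMMAS AND PROOFS =====

-- the token a nonempty gram contributes (g[-1], total form)
def tokOf (g : List String) : String := g.getLast?.getD ""

-- A's loop body, rewritten on the window it touches (branches collapsed)
def stepA' (d : PySem.Dict (List String) (PySem.Dict String Int)) (g : List String) :
    PySem.Dict (List String) (PySem.Dict String Int) :=
  d.insert g.dropLast
    ((d.getD g.dropLast PySem.Dict.empty).insert (tokOf g)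
      ((d.getD g.dropLast PySem.Dict.empty).getD (tokOf g) 0 + 1))

-- B's pass-2 body, rewritten the same way
def stepB' (totals : PySem.Dict (List String) Int)
    (d : PySem.Dict (List String) (PySem.Dict String Int)) (g : List String) :
    PySem.Dict (List String) (PySem.Dict String Int) :=
  d.insert g.dropLast
    ((d.getD g.dropLast PySem.Dict.empty).insert (tokOf g) (totals.getD g 0))

theorem tokOf_concat (c : List String) (t : String) : tokOf (c ++ [t]) = t := by
  simp [tokOf]

theorem eq_dropLast_concat_tokOf (g : List String) (h : g ≠ []) :
    g = g.dropLast ++ [tokOf g] := by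
  conv_lhs => rw [← List.dropLast_append_getLast h]
  rw [tokOf, List.getLast?_eq_some_getLast h]
  rfl

theorem pv_foldl_option_some {α β : Type} (f : Option α → β → Option α) (g : α → β → α)
    (l : List β) (h : ∀ d b, b ∈ l → f (some d) b = some (g d b)) :
    ∀ d, l.foldl f (some d) = some (l.foldl g d) := by
  induction l with
  | nil => intro d; rfl
  | cons b l ih =>
    intro d
    simp only [List.foldl_cons]
    rw [h d b List.mem_cons_self]
    exact ih (fun d b hb => h d b (List.mem_cons_of_mem _ hb)) _

-- A's raw body at index k equals stepA' on the window sequence[k:k+n]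
theorem pv_bodyA_eq (sequence : List String) (n : Int) (hn : 1 ≤ n)
    (hnl : n ≤ (sequence.length : Int)) (k : Nat) (hk : k < sequence.length + 1 - n.toNat)
    (d : PySem.Dict (List String) (PySem.Dict String Int)) :
    buildStepA sequence n (some d) (0 + (k : Int))
      = some (stepA' d ((sequence.drop k).take n.toNat)) := by
  set nn := n.toNat with hnn
  have hnn1 : 1 ≤ nn := by omega
  have hkL : k + nn ≤ sequence.length := by omega
  have hidx : k + nn - 1 < sequence.length := by omega
  rw [zero_add]
  set w := (sequence.drop k).take nn with hw
  have glen : w.length = nn := by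
    simp [hw, List.length_take, List.length_drop]; omega
  have e2 : (k : Int) + n - 1 = ((k + nn - 1 : Nat) : Int) := by omega
  have hctxA : PySem.List.slice sequence (some ((k:Nat) : Int)) (some ((k : Int) + n - 1))
      = w.dropLast := by
    rw [e2, PySem.List.slice_natCast, hw, List.dropLast_eq_take, glen, List.take_take]
    congr 1
    omega
  have htokA : PySem.List.pyGet? sequence ((k : Int) + n - 1)
      = some sequence[k + nn - 1] := by
    rw [e2, PySem.List.pyGet?_natCast, List.getElem?_eq_getElem hidx]
  have htokw : tokOf w = sequence[k + nn - 1] := by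
    have h2 : w.getLast? = some sequence[k + nn - 1] := by
      rw [List.getLast?_eq_getElem?, glen, hw,
          List.getElem?_take_of_lt (by omega), List.getElem?_drop,
          show k + (nn - 1) = k + nn - 1 by omega, List.getElem?_eq_getElem hidx]
    simp [tokOf, h2]
  simp only [buildStepA, htokA, hctxA, ← htokw, stepA']
  set ctx := w.dropLast
  set tok := tokOf w
  by_cases hc : d.contains ctx
  · rw [if_pos hc]
    by_cases ht : (d.getD ctx PySem.Dict.empty).contains tok
    · rw [if_pos ht]
    · rw [if_neg (by simp [ht]),
          PySem.Dict.getD_of_not_contains (d.getD ctx PySem.Dict.empty) (0:Int) (by simpa using ht)]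
      norm_num
  · rw [if_neg hc, PySem.Dict.getD_of_not_contains d PySem.Dict.empty (by simpa using hc)]
    rw [PySem.Dict.getD_insert_self, if_neg (by simp [PySem.Dict.contains_empty]),
        PySem.Dict.getD_empty, PySem.Dict.insert_insert_self]
    norm_num

-- B's raw pass-2 body on a nonempty gram equals stepB'
theorem pv_bodyB_eq (totals : PySem.Dict (List String) Int)
    (d : PySem.Dict (List String) (PySem.Dict String Int)) (g : List String) (h : g ≠ []) :
    buildStepB totals d g = stepB' totals d g := by
  have hctx : PySem.List.slice g none (some (-1)) = g.dropLast := PySem.List.slice_to_neg_one g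
  have htok : PySem.List.pyGet? g (-1) = some (tokOf g) := by
    rw [PySem.List.pyGet?_neg_one, List.getLast?_eq_some_getLast h]
    simp [tokOf, List.getLast?_eq_some_getLast h]
  simp only [buildStepB, hctx, htok, stepB']
  by_cases hc : d.contains g.dropLast
  · rw [PySem.Dict.setdefault_of_contains _ _ hc]
  · rw [PySem.Dict.setdefault_of_not_contains _ _ (by simpa using hc),
        PySem.Dict.getD_insert_self,
        PySem.Dict.getD_of_not_contains d PySem.Dict.empty (by simpa using hc),
        PySem.Dict.insert_insert_self]

-- per-context contents of A's fold
theorem pv_getD_foldA (gs : List (List String)) (c : List String) :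
    ∀ d, (gs.foldl stepA' d).getD c PySem.Dict.empty
      = ((gs.filter (fun g => g.dropLast == c)).map tokOf).foldl
          (fun inner t => inner.insert t (inner.getD t 0 + 1)) (d.getD c PySem.Dict.empty) := by
  induction gs with
  | nil => intro d; rfl
  | cons g gs ih =>
    intro d
    simp only [List.foldl_cons, List.filter_cons]
    by_cases hc : g.dropLast = c
    · rw [if_pos (by simpa using hc), ih]
      simp only [List.map_cons, List.foldl_cons, stepA', hc, PySem.Dict.getD_insert_self]
    · rw [if_neg (by simpa using hc), ih]
      congr 1
      simp only [stepA']
      exact PySem.Dict.getD_insert_of_ne _ _ _ (fun h => hc h.symm)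

-- per-context contents of B's fold
theorem pv_getD_foldB (totals : PySem.Dict (List String) Int)
    (gs : List (List String)) (c : List String) :
    ∀ d, (gs.foldl (stepB' totals) d).getD c PySem.Dict.empty
      = (gs.filter (fun g => g.dropLast == c)).foldl
          (fun inner g => inner.insert (tokOf g) (totals.getD g 0)) (d.getD c PySem.Dict.empty) := by
  induction gs with
  | nil => intro d; rfl
  | cons g gs ih =>
    intro d
    simp only [List.foldl_cons, List.filter_cons]
    by_cases hc : g.dropLast = c
    · rw [if_pos (by simpa using hc), ih]
      simp only [List.foldl_cons, stepB', hc, PySem.Dict.getD_insert_self]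
    · rw [if_neg (by simpa using hc), ih]
      congr 1
      simp only [stepB']
      exact PySem.Dict.getD_insert_of_ne _ _ _ (fun h => hc h.symm)

-- a fold of inserts whose value depends only on the key: last write wins with the same value
theorem pv_getD_foldl_insert_val (v : String → Int) (ts : List String) (t0 : String) :
    ∀ d, (ts.foldl (fun (d : PySem.Dict String Int) t => d.insert t (v t)) d).getD t0 0
      = if t0 ∈ ts then v t0 else d.getD t0 0 := by
  induction ts with
  | nil => intro d; simp
  | cons a ts ih =>
    intro d
    simp only [List.foldl_cons, ih, List.mem_cons]
    by_cases hts : t0 ∈ ts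
    · simp [hts]
    · by_cases ha : t0 = a
      · subst ha; simp [hts, PySem.Dict.getD_insert_self]
      · simp [hts, ha, PySem.Dict.getD_insert_of_ne d (v a) (0 : Int) ha]

-- gram count = token count within the gram's context (all grams nonempty)
theorem pv_count_eq (gs : List (List String)) (h : ∀ g ∈ gs, g ≠ [])
    (c : List String) (t : String) :
    gs.count (c ++ [t]) = ((gs.filter (fun g => g.dropLast == c)).map tokOf).count t := by
  rw [List.count_eq_countP, List.count_eq_countP, List.countP_map, List.countP_filter]
  apply List.countP_congr
  intro g hg
  have hne := h g hg
  simp only [Function.comp, beq_iff_eq, Bool.and_eq_true]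
  constructor
  · intro hgt
    subst hgt
    exact ⟨tokOf_concat c t, by simp⟩
  · rintro ⟨ht, hc⟩
    rw [eq_dropLast_concat_tokOf g hne, ht, hc]

-- the inner dict of B equals the inner counter of A at every context
theorem pv_inner_eq (gs : List (List String)) (h : ∀ g ∈ gs, g ≠ []) (c : List String) :
    (((gs.filter (fun g => g.dropLast == c)).map tokOf).foldl
        (fun (inner : PySem.Dict String Int) t => inner.insert t (inner.getD t 0 + 1))
        PySem.Dict.empty)
      = ((gs.filter (fun g => g.dropLast == c)).foldl
          (fun (inner : PySem.Dict String Int) g =>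
            inner.insert (tokOf g) ((PySem.Dict.counter gs).getD g 0))
          PySem.Dict.empty) := by
  set ts := (gs.filter (fun g => g.dropLast == c)).map tokOf with hts
  have hB : (gs.filter (fun g => g.dropLast == c)).foldl
      (fun (inner : PySem.Dict String Int) g =>
        inner.insert (tokOf g) ((PySem.Dict.counter gs).getD g 0)) PySem.Dict.empty
      = ts.foldl (fun (inner : PySem.Dict String Int) t =>
          inner.insert t ((PySem.Dict.counter gs).getD (c ++ [t]) 0)) PySem.Dict.empty := by
    rw [hts, List.foldl_map]
    apply PySem.List.foldl_congr_mem
    intro acc g hg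
    have hgm := List.mem_of_mem_filter hg
    have hc : g.dropLast = c := by simpa using List.of_mem_filter hg
    congr 2
    conv_lhs => rw [eq_dropLast_concat_tokOf g (h g hgm), hc]
  rw [hB, PySem.Dict.foldl_insert_getD_add_one_eq_counter]
  apply PySem.Dict.ext
  rw [PySem.Dict.items_eq_map_keys _ (PySem.Dict.nodup_keys_counter ts) (0 : Int),
      PySem.Dict.items_eq_map_keys _
        (PySem.Dict.nodup_keys_foldl_insert _ _ _ (by simp [PySem.Dict.keys_empty])) (0 : Int)]
  have hkeys : (ts.foldl (fun (inner : PySem.Dict String Int) t =>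
      inner.insert t ((PySem.Dict.counter gs).getD (c ++ [t]) 0)) PySem.Dict.empty).keys
      = (PySem.Dict.counter ts).keys := by
    rw [PySem.Dict.keys_counter, PySem.Dict.keys_foldl_insert, PySem.Dict.keys_empty,
        PySem.Set.update_nil_left]
  rw [hkeys]
  apply List.map_congr_left
  intro t hmem
  have htts : t ∈ ts := by
    rw [PySem.Dict.keys_counter] at hmem
    exact (PySem.Set.mem_ofList _ _).mp hmem
  rw [PySem.Dict.getD_counter, pv_getD_foldl_insert_val, if_pos htts,
      PySem.Dict.getD_counter, pv_count_eq gs h c t]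

-- the two clean folds agree on any list of nonempty grams
theorem pv_models_eq (gs : List (List String)) (h : ∀ g ∈ gs, g ≠ []) :
    gs.foldl stepA' PySem.Dict.empty
      = gs.foldl (stepB' (PySem.Dict.counter gs)) PySem.Dict.empty := by
  have hA : gs.foldl stepA' PySem.Dict.empty
      = gs.foldl (fun d g => d.insert g.dropLast
          ((d.getD g.dropLast PySem.Dict.empty).insert (tokOf g)
            ((d.getD g.dropLast PySem.Dict.empty).getD (tokOf g) 0 + 1))) PySem.Dict.empty := rfl
  have hB : gs.foldl (stepB' (PySem.Dict.counter gs)) PySem.Dict.empty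
      = gs.foldl (fun d g => d.insert g.dropLast
          ((d.getD g.dropLast PySem.Dict.empty).insert (tokOf g)
            ((PySem.Dict.counter gs).getD g 0))) PySem.Dict.empty := rfl
  have hnodA : (gs.foldl stepA' PySem.Dict.empty).keys.Nodup := by
    rw [hA]
    exact PySem.Dict.nodup_keys_foldl_insert_key _ _ _ _ (by simp [PySem.Dict.keys_empty])
  have hnodB : (gs.foldl (stepB' (PySem.Dict.counter gs)) PySem.Dict.empty).keys.Nodup := by
    rw [hB]
    exact PySem.Dict.nodup_keys_foldl_insert_key _ _ _ _ (by simp [PySem.Dict.keys_empty])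
  apply PySem.Dict.ext
  rw [PySem.Dict.items_eq_map_keys _ hnodA PySem.Dict.empty,
      PySem.Dict.items_eq_map_keys _ hnodB PySem.Dict.empty]
  have hkeys : (gs.foldl stepA' PySem.Dict.empty).keys
      = (gs.foldl (stepB' (PySem.Dict.counter gs)) PySem.Dict.empty).keys := by
    rw [hA, hB, PySem.Dict.keys_foldl_insert_key, PySem.Dict.keys_foldl_insert_key]
  rw [← hkeys]
  apply List.map_congr_left
  intro c _
  rw [pv_getD_foldA, pv_getD_foldB, PySem.Dict.getD_empty, pv_inner_eq gs h c]

-- the full equivalence for n ≥ 1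
theorem pv_equiv (sequence : List String) (n : Int) (hn : 1 ≤ n) :
    build_n_gram sequence n = build_n_gram_alt sequence n := by
  by_cases hbig : (sequence.length : Int) < n
  · have hA : PySem.List.pyRange 0 ((sequence.length : Int) - n + 1) 1 = [] :=
      PySem.List.pyRange_one_eq_nil (by omega)
    unfold build_n_gram build_n_gram_alt
    rw [hA, if_pos (Or.inr hbig)]
    simp [PySem.Dict.empty]
  · have hn0 : ¬ (n < 1 ∨ (sequence.length : Int) < n) := by omega
    have hnn1 : 1 ≤ n.toNat := by omega
    set N := sequence.length + 1 - n.toNat with hN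
    set w : Nat → List String := fun k => (sequence.drop k).take n.toNat with hw
    set gs := (List.range N).map w with hgs
    have hne : ∀ g ∈ gs, g ≠ [] := by
      intro g hg
      rw [hgs] at hg
      obtain ⟨k, hk, rfl⟩ := List.mem_map.mp hg
      have hk' := List.mem_range.mp hk
      have hlen : (w k).length = n.toNat := by
        simp [hw, List.length_take, List.length_drop]; omega
      intro hnil
      rw [hnil] at hlen
      simp at hlen
      omega
    have hR : PySem.List.pyRange 0 ((sequence.length : Int) - n + 1) 1
        = (List.range N).map (fun k : Nat => 0 + (k : Int)) := by
      rw [PySem.List.pyRange_one]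
      congr 1
      rw [hN]
      congr 1
      omega
    have hfold : gs.foldl stepA' PySem.Dict.empty
        = (List.range N).foldl (fun d k => stepA' d (w k)) PySem.Dict.empty := by
      rw [hgs, List.foldl_map]
    have hAside : (PySem.List.pyRange 0 ((sequence.length : Int) - n + 1) 1).foldl
        (buildStepA sequence n) (some PySem.Dict.empty)
        = some (gs.foldl stepA' PySem.Dict.empty) := by
      rw [hR, List.foldl_map,
          pv_foldl_option_some (fun st (k : Nat) => buildStepA sequence n st (0 + (k : Int)))
            (fun d (k : Nat) => stepA' d (w k)) _
            (fun d k hk => pv_bodyA_eq sequence n hn (by omega) k (List.mem_range.mp hk) d)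
            PySem.Dict.empty,
          ← hfold]
    have hgrams : (PySem.List.pyRange 0 ((sequence.length : Int) - n + 1) 1).map
        (fun i => PySem.List.slice sequence (some i) (some (i + n))) = gs := by
      rw [hR, List.map_map, hgs]
      apply List.map_congr_left
      intro k hk
      have hk' := List.mem_range.mp hk
      simp only [Function.comp]
      rw [zero_add, show (k : Int) + n = (k : Int) + (n.toNat : Int) by omega,
          PySem.List.slice_natCast_add]
    have hstep : gs.foldl (buildStepB (PySem.Dict.counter gs)) PySem.Dict.empty
        = gs.foldl (stepB' (PySem.Dict.counter gs)) PySem.Dict.empty :=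
      PySem.List.foldl_congr_mem _ _ _ _ (fun acc g hg => pv_bodyB_eq _ acc g (hne g hg))
    unfold build_n_gram build_n_gram_alt
    rw [if_neg hn0]
    simp only [hAside, hgrams, PySem.Dict.foldl_insert_getD_add_one_eq_counter, hstep,
      ← pv_models_eq gs hne]

-- A's model is nonempty whenever its loop runs and never raises (for the tight claim)
theorem pv_size_insert_pos (d : PySem.Dict (List String) (PySem.Dict String Int))
    (k : List String) (v : PySem.Dict String Int) : 1 ≤ (d.insert k v).size := by
  have hm : k ∈ (d.insert k v).keys := (PySem.Dict.mem_keys_insert _ k k v).mpr (Or.inl rfl)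
  have := List.length_pos_of_mem hm
  simpa [PySem.Dict.keys, PySem.Dict.size] using this

theorem pv_stepA_grow (sequence : List String) (n : Int)
    (d : PySem.Dict (List String) (PySem.Dict String Int)) (i : Int)
    (hget : PySem.List.pyGet? sequence (i + n - 1) ≠ none) :
    ∃ d', buildStepA sequence n (some d) i = some d' ∧ 1 ≤ d'.size ∧ d.size ≤ d'.size := by
  obtain ⟨tok, htok⟩ := Option.ne_none_iff_exists'.mp hget
  simp only [buildStepA, htok]
  set ctx := PySem.List.slice sequence (some i) (some (i + n - 1)) with hctx
  set d1 := if d.contains ctx then d else d.insert ctx PySem.Dict.empty with hd1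
  set inner := d1.getD ctx PySem.Dict.empty with hinner
  set inner' := if inner.contains tok then inner.insert tok (inner.getD tok 0 + 1)
                else inner.insert tok 1 with hinner'
  refine ⟨d1.insert ctx inner', rfl, pv_size_insert_pos _ _ _, ?_⟩
  have h1 : d.size ≤ d1.size := by
    rw [hd1]; split
    · exact le_refl _
    · rw [PySem.Dict.size_insert]; split <;> omega
  have h2 : d1.size ≤ (d1.insert ctx inner').size := by
    rw [PySem.Dict.size_insert]; split <;> omega
  omega

theorem pv_foldA_grow (sequence : List String) (n : Int) (l : List Int)
    (h : ∀ i ∈ l, PySem.List.pyGet? sequence (i + n - 1) ≠ none) :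
    ∀ d, ∃ d', l.foldl (buildStepA sequence n) (some d) = some d' ∧ d.size ≤ d'.size := by
  induction l with
  | nil => exact fun d => ⟨d, rfl, le_refl _⟩
  | cons i l ih =>
    intro d
    obtain ⟨d0, hd0, _, hsz0⟩ := pv_stepA_grow sequence n d i (h i List.mem_cons_self)
    obtain ⟨d', hd', hsz⟩ := ih (fun j hj => h j (List.mem_cons_of_mem _ hj)) d0
    exact ⟨d', by simpa [List.foldl_cons, hd0] using hd', le_trans hsz0 hsz⟩

theorem pv_tight (sequence : List String) (n : Int)
    (hpre : -(sequence.length : Int) < n) (hD : n ≤ 0) :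
    build_n_gram sequence n ≠ build_n_gram_alt sequence n := by
  have hB : build_n_gram_alt sequence n = [] := by
    unfold build_n_gram_alt; rw [if_pos (Or.inl (by omega))]
  rw [hB]
  have hget : ∀ i ∈ PySem.List.pyRange 0 ((sequence.length : Int) - n + 1) 1,
      PySem.List.pyGet? sequence (i + n - 1) ≠ none := by
    intro i hi
    have hmem := PySem.List.mem_pyRange_one.mp hi
    rw [Ne, PySem.List.pyGet?_eq_none_iff]
    intro hcon
    exact hcon ⟨by omega, by omega⟩
  have hcons : PySem.List.pyRange 0 ((sequence.length : Int) - n + 1) 1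
      = 0 :: PySem.List.pyRange (0 + 1) ((sequence.length : Int) - n + 1) 1 :=
    PySem.List.pyRange_one_cons (by omega)
  obtain ⟨d0, hd0, hsz0, _⟩ := pv_stepA_grow sequence n PySem.Dict.empty 0
    (hget 0 (by rw [hcons]; exact List.mem_cons_self))
  obtain ⟨d', hd', hsz⟩ := pv_foldA_grow sequence n _
    (fun j hj => hget j (by rw [hcons]; exact List.mem_cons_of_mem _ hj)) d0
  unfold build_n_gram
  rw [hcons, List.foldl_cons, hd0, hd']
  intro hcontra
  have hlen := congrArg List.length hcontra
  simp only [List.length_map, List.length_nil] at hlen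
  have : d'.size = d'.items.length := rfl
  omega

-- ===== VERDICT (by name: the statement is the Claim_ definition above) =====
theorem build_n_gram_spec : Claim_unchanged_build_n_gram := by
  intro sequence n _ _ hnd
  unfold D_build_n_gram at hnd
  exact pv_equiv sequence n (by omega)
theorem build_n_gram_changed : Claim_changed_build_n_gram := by unfold Claim_changed_build_n_gram; decide
theorem build_n_gram_tight : Claim_exact_build_n_gram := by
  intro sequence n _ hpre hD
  unfold Pre_build_n_gram at hpre
  unfold D_build_n_gram at hD
  exact pv_tight sequence n hpre hD
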